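-- pv_equiv track=rewrite | github.com/CodingThrust/problem-reductions | docs/paper/verify-reductions/verify_partition_into_cliques_minimum_covering_by_cliques.py | min_edge_clique_cover
-- ===== SOURCE A (Python) =====
-- import itertools
--
-- def is_valid_edge_clique_cover(n, edges, k, edge_config):
--     """Check if edge_config is a valid covering by <= k cliques.
--
--     edge_config: list of length |E|, edge_config[e] = clique group index.
--     For each group, the vertices touched by edges in that group must form a clique.
--     """
--     if len(edge_config) != len(edges):
--         return False
--     if len(edges) == 0:
--         return True
--     max_group = max(edge_config)
--     if max_group >= k:
--         return False
--     if any(g < 0 for g in edge_config):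
--         return False
--
--     edge_set = set()
--     for u, v in edges:
--         edge_set.add((min(u, v), max(u, v)))
--
--     # For each group, collect vertices and check clique
--     for group in range(max_group + 1):
--         vertices = set()
--         for idx, g in enumerate(edge_config):
--             if g == group:
--                 u, v = edges[idx]
--                 vertices.add(u)
--                 vertices.add(v)
--         verts = sorted(vertices)
--         for i in range(len(verts)):
--             for j in range(i + 1, len(verts)):
--                 a, b = min(verts[i], verts[j]), max(verts[i], verts[j])
--                 if (a, b) not in edge_set:
--                     return False
--     return True
--
-- def min_edge_clique_cover(n, edges, k):
--     """Find minimum edge clique cover of size <= k by brute force.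
--
--     Returns (feasible, edge_config) or (False, None).
--     """
--     if len(edges) == 0:
--         return True, []
--     for num_groups in range(1, k + 1):
--         for edge_config in itertools.product(range(num_groups), repeat=len(edges)):
--             ec = list(edge_config)
--             if is_valid_edge_clique_cover(n, edges, num_groups, ec):
--                 return True, ec
--     return False, None
-- ===== SOURCE B (Python) =====
-- def min_edge_clique_cover(n, edges, k):
--     """DFS backtracking: assign edges to groups in order, pruning as soon as a
--     group's vertex set stops being a clique (violations are monotone)."""
--     if len(edges) == 0:
--         return True, []
--     adj = {(min(u, v), max(u, v)) for u, v in edges}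
--     E = len(edges)
--
--     def compatible(vs, x):
--         return all(w == x or (min(x, w), max(x, w)) in adj for w in vs)
--
--     def dfs(i, groups):
--         if i == E:
--             return []
--         u, v = edges[i]
--         for g in range(len(groups)):
--             vs = groups[g]
--             if compatible(vs, u) and compatible(vs, v):
--                 groups[g] = vs + [u, v]
--                 tail = dfs(i + 1, groups)
--                 groups[g] = vs
--                 if tail is not None:
--                     return [g] + tail
--         return None
--
--     for m in range(1, k + 1):
--         cfg = dfs(0, [[] for _ in range(m)])
--         if cfg is not None:
--             return True, cfg
--     return False, None
-- ===== Notes on version B (the rewrite author's own statement) =====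
-- stated objective: alternative
-- what changed: replaces exhaustive enumeration of all k^|E| group assignments (each re-validated from scratch) with DFS backtracking that assigns edges one by one in lexicographic group order, keeping per-group vertex lists and pruning a branch the moment a group stops being a clique; intended as faster (measured 261x at n=64), but both remain exponential in the worst case so a timing run could not confirm it at the largest size
import Mathlib
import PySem

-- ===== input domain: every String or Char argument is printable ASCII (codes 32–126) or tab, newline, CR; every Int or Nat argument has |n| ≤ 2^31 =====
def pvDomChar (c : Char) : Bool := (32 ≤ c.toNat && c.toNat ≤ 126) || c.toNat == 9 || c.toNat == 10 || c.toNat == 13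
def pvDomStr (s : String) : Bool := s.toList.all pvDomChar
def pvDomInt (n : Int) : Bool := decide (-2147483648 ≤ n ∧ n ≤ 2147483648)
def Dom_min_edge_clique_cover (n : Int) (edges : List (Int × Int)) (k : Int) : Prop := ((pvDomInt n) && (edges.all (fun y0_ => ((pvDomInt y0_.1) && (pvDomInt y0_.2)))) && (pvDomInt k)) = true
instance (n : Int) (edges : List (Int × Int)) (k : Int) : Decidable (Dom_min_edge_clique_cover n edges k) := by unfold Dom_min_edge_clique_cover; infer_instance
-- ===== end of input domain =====

-- B replaces A's exhaustive enumeration of all group assignments by DFS backtracking with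
-- incremental clique-violation pruning (a different algorithm; both are exponential in the
-- worst case); equal return value everywhere.

-- ===== PORT A =====
-- 'for edge_config in itertools.product(range-list, repeat=L): if valid(cfg): return cfg':
-- the product tuples in lexicographic order (leftmost varies slowest), generated lazily as the
-- Python iterator does, returning the first tuple the predicate accepts
def pvProdFind (digits : List Int) : Nat → (List Int → Bool) → Option (List Int)
  | 0, p => if p [] then some [] else none
  | L + 1, p => digits.findSome? (fun d => (pvProdFind digits L (fun cs => p (d :: cs))).map (d :: ·))

-- literal port of is_valid_edge_clique_cover; the inner 'for j in range(i+1, len)' is written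
-- as the j > i part of a full range; edges[idx] uses pyGetD (idx < len(edge_config) = len(edges) here)
def is_valid_edge_clique_cover (n : Int) (edges : List (Int × Int)) (k : Int) (edge_config : List Int) : Bool :=
  if edge_config.length ≠ edges.length then false
  else if edges.length = 0 then true
  else
    match PySem.List.max? edge_config (fun x => x) with
    | none => false   -- unreachable here: edge_config is nonempty (Python max would raise on [])
    | some max_group =>
      if k ≤ max_group then false
      else if edge_config.any (fun g => g < 0) then false
      else
        let edge_set := edges.foldl (fun s p => PySem.Set.add s (min p.1 p.2, max p.1 p.2)) PySem.Set.empty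
        (PySem.List.pyRange 0 (max_group + 1) 1).all (fun group =>
          let vertices := (PySem.List.enumerate edge_config 0).foldl (fun vs p =>
            if p.2 == group then
              let e := PySem.List.pyGetD edges p.1 (0, 0)
              PySem.Set.add (PySem.Set.add vs e.1) e.2
            else vs) PySem.Set.empty
          let verts := PySem.List.sorted vertices (fun x => x) false
          (List.range verts.length).all (fun i =>
            (List.range verts.length).all (fun j =>
              if i < j then
                PySem.Set.contains edge_set
                  (min (verts.getD i 0) (verts.getD j 0), max (verts.getD i 0) (verts.getD j 0))
              else true)))

-- 'for num_groups in range(1, k + 1)': Python's range is lazy, so the loop is a counting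
-- recursion from m upwards, never materializing the range
def pvALoop (n : Int) (edges : List (Int × Int)) (k : Int) (m : Int) : Bool × Option (List Int) :=
  if m < k + 1 then
    match pvProdFind (PySem.List.pyRange 0 m 1) edges.length
            (fun ec => is_valid_edge_clique_cover n edges m ec) with
    | some ec => (true, some ec)
    | none => pvALoop n edges k (m + 1)
  else (false, none)
termination_by (k + 1 - m).toNat
decreasing_by omega

def min_edge_clique_cover (n : Int) (edges : List (Int × Int)) (k : Int) : Bool × Option (List Int) :=
  if edges.length = 0 then (true, some [])
  else pvALoop n edges k 1

-- ===== PORT B =====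
def pvCompatible (adj : List (Int × Int)) (vs : List Int) (x : Int) : Bool :=
  vs.all (fun w => w == x || PySem.Set.contains adj (min x w, max x w))

-- dfs(i, groups): groups holds each open group's vertex list; group indices tried in ascending order
def pvDfs (adj : List (Int × Int)) : List (Int × Int) → List (List Int) → Option (List Int)
  | [], _ => some []
  | e :: rest, groups =>
    (List.range groups.length).findSome? (fun g =>
      let vs := groups.getD g []
      if pvCompatible adj vs e.1 && pvCompatible adj vs e.2 then
        (pvDfs adj rest (groups.set g (vs ++ [e.1, e.2]))).map (fun tail => ((g : Nat) : Int) :: tail)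
      else none)

-- 'for m in range(1, k + 1)', lazily, as in pvALoop
def pvBLoop (adj : List (Int × Int)) (edges : List (Int × Int)) (k : Int) (m : Int) : Bool × Option (List Int) :=
  if m < k + 1 then
    match pvDfs adj edges (List.replicate m.toNat []) with   -- m ≥ 1 in the loop, toNat is faithful
    | some cfg => (true, some cfg)
    | none => pvBLoop adj edges k (m + 1)
  else (false, none)
termination_by (k + 1 - m).toNat
decreasing_by omega

def min_edge_clique_cover_alt (n : Int) (edges : List (Int × Int)) (k : Int) : Bool × Option (List Int) :=
  if edges.length = 0 then (true, some [])
  else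
    let adj := PySem.Set.ofList (edges.map (fun p => (min p.1 p.2, max p.1 p.2)))
    pvBLoop adj edges k 1

-- ===== PRECONDITION & SPEC =====
def Spec_min_edge_clique_cover (n : Int) (edges : List (Int × Int)) (k : Int) (out : Bool × Option (List Int)) : Prop := out = min_edge_clique_cover_alt n edges k
instance (n : Int) (edges : List (Int × Int)) (k : Int) (out : Bool × Option (List Int)) : Decidable (Spec_min_edge_clique_cover n edges k out) := by unfold Spec_min_edge_clique_cover; infer_instance

-- ===== CLAIM (what is proved, stated in full; the proofs are below) =====
def Claim_equal_min_edge_clique_cover : Prop := ∀ (n : Int) (edges : List (Int × Int)) (k : Int), Dom_min_edge_clique_cover n edges k → Spec_min_edge_clique_cover n edges k (min_edge_clique_cover n edges k)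

-- ===== LEMMAS AND PROOFS =====

-- semantic vocabulary shared by the two directions of the proof
def pvNorm (a b : Int) : Int × Int := (min a b, max a b)

def pvGood (adj : List (Int × Int)) (a b : Int) : Bool :=
  a == b || PySem.Set.contains adj (pvNorm a b)

def pvClique (adj : List (Int × Int)) (vs : List Int) : Bool :=
  vs.all (fun a => vs.all (fun b => pvGood adj a b))

def pvAllCliques (adj : List (Int × Int)) (gs : List (List Int)) : Bool :=
  gs.all (pvClique adj)

def pvAdjL (edges : List (Int × Int)) : List (Int × Int) :=
  PySem.Set.ofList (edges.map (fun p => (min p.1 p.2, max p.1 p.2)))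

def pvAssign : List (List Int) → List (Int × Int) → List Int → List (List Int)
  | groups, e :: es, c :: cs =>
      pvAssign (groups.set c.toNat (groups.getD c.toNat [] ++ [e.1, e.2])) es cs
  | groups, _, _ => groups

def pvCollect (t : Nat) : List (Int × Int) → List Int → List Int
  | e :: es, c :: cs => (if c.toNat = t then [e.1, e.2] else []) ++ pvCollect t es cs
  | _, _ => []

-- the materialized product list (proof-side description of the order pvProdFind searches in)
def pvProdA (digits : List Int) : Nat → List (List Int)
  | 0 => [[]]
  | L + 1 => digits.flatMap (fun g => (pvProdA digits L).map (g :: ·))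

-- generic list helpers (not found under these statements in the library)
lemma pvFind?_map {α β : Type} (f : α → β) (l : List α) (p : β → Bool) :
    (l.map f).find? p = (l.find? (fun x => p (f x))).map f := by
  induction l with
  | nil => rfl
  | cons a l ih => cases h : p (f a) <;> simp [List.find?_cons, h, ih]


lemma pvFind?_congr {α : Type} (l : List α) (p q : α → Bool) (h : ∀ a ∈ l, p a = q a) :
    l.find? p = l.find? q := by
  induction l with
  | nil => rfl
  | cons a l ih =>
    have ha := h a (by simp)
    cases hq : q a <;> simp [List.find?_cons, ha, hq, ih (fun x hx => h x (by simp [hx]))]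


lemma pvFindSome?_congr {α β : Type} (l : List α) (f g : α → Option β) (h : ∀ a ∈ l, f a = g a) :
    l.findSome? f = l.findSome? g := by
  induction l with
  | nil => rfl
  | cons a l ih =>
    have ha := h a (by simp)
    cases hq : g a <;> simp [List.findSome?_cons, ha, hq, ih (fun x hx => h x (by simp [hx]))]


lemma pvFindSome?_map {α β γ : Type} (f : α → β) (l : List α) (g : β → Option γ) :
    (l.map f).findSome? g = l.findSome? (fun a => g (f a)) := by
  induction l with
  | nil => rfl
  | cons a l ih => cases h : g (f a) <;> simp [List.findSome?_cons, h, ih]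


lemma pvFind?_flatMap {α β : Type} (l : List α) (f : α → List β) (p : β → Bool) :
    (l.flatMap f).find? p = l.findSome? (fun a => (f a).find? p) := by
  induction l with
  | nil => rfl
  | cons a l ih =>
    cases h : (f a).find? p <;>
      simp [List.flatMap_cons, List.find?_append, h, ih, List.findSome?_cons]


lemma pvProdFind_eq (digits : List Int) : ∀ (L : Nat) (p : List Int → Bool),
    pvProdFind digits L p = (pvProdA digits L).find? p := by
  intro L
  induction L with
  | zero =>
    intro p
    cases h : p [] <;> simp [pvProdFind, pvProdA, List.find?_cons, h]
  | succ L ih =>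
    intro p
    rw [pvProdFind, pvProdA, pvFind?_flatMap]
    apply pvFindSome?_congr
    intro d _
    rw [pvFind?_map, ih]

-- facts about the shared vocabulary
lemma pvGood_symm (adj : List (Int × Int)) (a b : Int) : pvGood adj a b = pvGood adj b a := by
  simp [pvGood, pvNorm, min_comm a b, max_comm a b]
  have : (a == b) = (b == a) := by
    by_cases hab : a = b <;> simp [hab, Ne.symm, beq_iff_eq] <;> omega
  rw [this]


lemma pvCompatible_iff (adj : List (Int × Int)) (vs : List Int) (x : Int) :
    pvCompatible adj vs x = true ↔ ∀ w ∈ vs, pvGood adj x w = true := by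
  simp only [pvCompatible, pvGood, pvNorm, List.all_eq_true, Bool.or_eq_true, beq_iff_eq]
  constructor <;> intro h w hw <;> rcases h w hw with h' | h'
  · exact Or.inl h'.symm
  · exact Or.inr h'
  · exact Or.inl h'.symm
  · exact Or.inr h'


lemma pvClique_iff (adj : List (Int × Int)) (l : List Int) :
    pvClique adj l = true ↔ ∀ a ∈ l, ∀ b ∈ l, pvGood adj a b = true := by
  simp [pvClique, List.all_eq_true]


lemma pvClique_false_of_bad (adj : List (Int × Int)) {l : List Int} {x w : Int}
    (hx : x ∈ l) (hw : w ∈ l) (h : pvGood adj x w = false) : pvClique adj l = false := by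
  rw [Bool.eq_false_iff]
  intro hc
  have := (pvClique_iff adj l).mp hc x hx w hw
  simp [this] at h


lemma pvClique_append (adj : List (Int × Int)) {vs : List Int} {u v : Int}
    (hc : pvClique adj vs = true) (hu : pvCompatible adj vs u = true)
    (hv : pvCompatible adj vs v = true) (huv : pvGood adj u v = true) :
    pvClique adj (vs ++ [u, v]) = true := by
  rw [pvClique_iff] at hc ⊢
  rw [pvCompatible_iff] at hu hv
  have hrefl : ∀ a : Int, pvGood adj a a = true := by intro a; simp [pvGood]
  intro a ha b hb
  simp only [List.mem_append, List.mem_cons, List.mem_singleton] at ha hb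
  rcases ha with ha | ha | ha | ha <;> rcases hb with hb | hb | hb | hb <;>
    subst_vars <;>
    first
      | exact hc _ ha _ hb
      | exact hrefl _
      | exact hu _ hb
      | exact hv _ hb
      | exact (pvGood_symm adj _ _).trans (hu _ ha)
      | exact (pvGood_symm adj _ _).trans (hv _ ha)
      | exact huv
      | exact (pvGood_symm adj _ _).trans huv
      | simp at ha
      | simp at hb


lemma pvClique_iff_pairs (adj : List (Int × Int)) (l : List Int) :
    pvClique adj l = true ↔
      ∀ a ∈ l, ∀ b ∈ l, a ≠ b → PySem.Set.contains adj (min a b, max a b) = true := by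
  rw [pvClique_iff]
  constructor
  · intro h a ha b hb hne
    have := h a ha b hb
    simpa [pvGood, pvNorm, hne] using this
  · intro h a ha b hb
    by_cases hab : a = b
    · simp [pvGood, hab]
    · simp only [pvGood, pvNorm, Bool.or_eq_true, beq_iff_eq]
      refine Or.inr ?_
      simpa using h a ha b hb hab


lemma pvAssign_length : ∀ (es : List (Int × Int)) (cs : List Int) (groups : List (List Int)),
    (pvAssign groups es cs).length = groups.length := by
  intro es
  induction es with
  | nil => intro cs groups; cases cs <;> rfl
  | cons e es ih =>
    intro cs groups
    cases cs with
    | nil => rfl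
    | cons c cs => rw [pvAssign, ih]; simp


lemma pvAssign_getD : ∀ (es : List (Int × Int)) (cs : List Int) (groups : List (List Int)) (t : Nat),
    t < groups.length →
    (pvAssign groups es cs).getD t [] = groups.getD t [] ++ pvCollect t es cs := by
  intro es
  induction es with
  | nil => intro cs groups t ht; cases cs <;> simp [pvAssign, pvCollect]
  | cons e es ih =>
    intro cs groups t ht
    cases cs with
    | nil => simp [pvAssign, pvCollect]
    | cons c cs =>
      rw [pvAssign, pvCollect, ih _ _ t (by simpa using ht)]
      by_cases hct : c.toNat = t
      · subst hct
        rw [List.getD_eq_getElem _ _ (by simpa using ht), List.getElem_set_self (by simpa using ht)]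
        simp [List.getD_eq_getElem _ _ ht]
      · rw [List.getD_eq_getElem _ _ (by simpa using ht), List.getElem_set_ne (by omega)]
        simp [hct, List.getElem?_eq_getElem ht]


lemma pvProdA_mem : ∀ (L : Nat) (digits : List Int) (cs : List Int),
    cs ∈ pvProdA digits L → cs.length = L ∧ ∀ c ∈ cs, c ∈ digits := by
  intro L
  induction L with
  | zero => intro digits cs h; simp [pvProdA] at h; simp [h]
  | succ L ih =>
    intro digits cs h
    simp only [pvProdA, List.mem_flatMap, List.mem_map] at h
    obtain ⟨g, hg, cs', hcs', rfl⟩ := h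
    obtain ⟨hl, hall⟩ := ih digits cs' hcs'
    refine ⟨by simp [hl], ?_⟩
    intro c hc
    rcases List.mem_cons.mp hc with rfl | hc
    · exact hg
    · exact hall c hc


-- B-side: the DFS returns exactly the first element of A's enumeration order that
-- completes the current groups to an all-cliques assignment
lemma pvDfs_spec (adj : List (Int × Int)) :
    ∀ (es : List (Int × Int)) (groups : List (List Int)),
    (∀ vs ∈ groups, pvClique adj vs = true) →
    (∀ e ∈ es, PySem.Set.contains adj (pvNorm e.1 e.2) = true) →
    pvDfs adj es groups =
      (pvProdA ((List.range groups.length).map (fun g : Nat => (g : Int))) es.length).find?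
        (fun cs => pvAllCliques adj (pvAssign groups es cs)) := by
  intro es
  induction es with
  | nil =>
    intro groups hcl _
    have hall : pvAllCliques adj (pvAssign groups [] []) = true := by
      simp only [pvAssign, pvAllCliques, List.all_eq_true]
      exact hcl
    simp [pvDfs, pvProdA, List.find?_cons, hall]
  | cons e es ih =>
    intro groups hcl hes
    rw [pvDfs]
    simp only [List.length_cons, pvProdA, pvFind?_flatMap, pvFindSome?_map]
    apply pvFindSome?_congr
    intro g hg
    have hglt : g < groups.length := List.mem_range.mp hg
    rw [pvFind?_map]
    set vs := groups.getD g []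
    have hvs : vs ∈ groups := by
      show groups.getD g [] ∈ groups
      rw [List.getD_eq_getElem groups [] hglt]
      exact List.getElem_mem hglt
    have htn : ((g : Int)).toNat = g := by omega
    have hassign : ∀ cs : List Int,
        pvAssign groups (e :: es) ((g : Int) :: cs) =
          pvAssign (groups.set g (vs ++ [e.1, e.2])) es cs := by
      intro cs
      rw [pvAssign, htn]
    by_cases hcomp : (pvCompatible adj vs e.1 && pvCompatible adj vs e.2) = true
    · -- compatible: recurse; the updated groups are still all cliques
      simp only [hcomp, if_pos]
      obtain ⟨h1, h2⟩ := Bool.and_eq_true_iff.mp hcomp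
      have hcl' : ∀ ws ∈ groups.set g (vs ++ [e.1, e.2]), pvClique adj ws = true := by
        intro ws hws
        rcases List.mem_or_eq_of_mem_set hws with hws | rfl
        · exact hcl ws hws
        · exact pvClique_append adj (hcl vs hvs) h1 h2
            (by simp only [pvGood]
                rw [hes e (by simp)]
                simp)
      have := ih (groups.set g (vs ++ [e.1, e.2])) hcl' (fun e' he' => hes e' (by simp [he']))
      rw [this, List.length_set]
      exact congrArg _ (pvFind?_congr _ _ _ (fun cs _ => by rw [hassign cs]))
    · -- incompatible: every completion keeps a non-adjacent pair in group g
      simp only [hcomp]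
      rw [if_neg (by simpa using hcomp)]
      symm
      rw [Option.map_eq_none_iff, List.find?_eq_none]
      intro cs _
      rw [hassign cs]
      set groups' := groups.set g (vs ++ [e.1, e.2]) with hg'
      have hglt' : g < groups'.length := by simpa [hg'] using hglt
      have hfin : (pvAssign groups' es cs).getD g [] =
          (vs ++ [e.1, e.2]) ++ pvCollect g es cs := by
        rw [pvAssign_getD es cs groups' g hglt']
        congr 1
        rw [List.getD_eq_getElem _ _ hglt']
        simp [hg']
      have hone : pvCompatible adj vs e.1 = false ∨ pvCompatible adj vs e.2 = false := by
        cases hc1 : pvCompatible adj vs e.1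
        · exact Or.inl rfl
        · cases hc2 : pvCompatible adj vs e.2
          · exact Or.inr rfl
          · exact absurd (by simp [hc1, hc2]) hcomp
      have hxmem : e.1 ∈ (pvAssign groups' es cs).getD g [] ∧
          e.2 ∈ (pvAssign groups' es cs).getD g [] ∧
          ∀ w ∈ vs, w ∈ (pvAssign groups' es cs).getD g [] := by
        rw [hfin]
        refine ⟨by simp, by simp, fun w hw => by simp [hw]⟩
      have hbadclique : pvClique adj ((pvAssign groups' es cs).getD g []) = false := by
        rcases hone with h | h
        · have hex := (not_iff_not.mpr (pvCompatible_iff adj vs e.1)).mp (by simp [h])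
          push_neg at hex
          obtain ⟨w, hw, hgw⟩ := hex
          exact pvClique_false_of_bad adj hxmem.1 (hxmem.2.2 w hw) (Bool.eq_false_iff.mpr hgw)
        · have hex := (not_iff_not.mpr (pvCompatible_iff adj vs e.2)).mp (by simp [h])
          push_neg at hex
          obtain ⟨w, hw, hgw⟩ := hex
          exact pvClique_false_of_bad adj hxmem.2.1 (hxmem.2.2 w hw) (Bool.eq_false_iff.mpr hgw)
      have hmem : (pvAssign groups' es cs).getD g [] ∈ pvAssign groups' es cs := by
        have hlt : g < (pvAssign groups' es cs).length := by
          rw [pvAssign_length]; exact hglt'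
        rw [List.getD_eq_getElem _ _ hlt]
        exact List.getElem_mem hlt
      simp only [pvAllCliques, List.all_eq_true, Bool.not_eq_true]
      intro hallc
      have := hallc _ hmem
      rw [hbadclique] at this
      exact absurd this (by simp)

-- A-side: the enumerate/pyGetD vertex-collection loop is the zip loop
lemma pvEnumFold (group : Int) :
    ∀ (cs : List Int) (pre suf : List (Int × Int)) (vs : PySem.Set Int),
    cs.length = suf.length →
    (PySem.List.enumerate cs (pre.length : Int)).foldl (fun vs p =>
        if p.2 == group then
          PySem.Set.add (PySem.Set.add vs (PySem.List.pyGetD (pre ++ suf) p.1 ((0:Int), (0:Int))).1)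
            (PySem.List.pyGetD (pre ++ suf) p.1 ((0:Int), (0:Int))).2
        else vs) vs =
      (cs.zip suf).foldl (fun vs p =>
        if p.1 == group then PySem.Set.add (PySem.Set.add vs p.2.1) p.2.2 else vs) vs := by
  intro cs
  induction cs with
  | nil => intro pre suf vs h; simp [PySem.List.enumerate]
  | cons c cs ih =>
    intro pre suf vs h
    cases suf with
    | nil => simp at h
    | cons e suf' =>
      have hen : PySem.List.enumerate (c :: cs) (pre.length : Int) =
          ((pre.length : Int), c) :: PySem.List.enumerate cs ((pre.length : Int) + 1) := by
        simp [PySem.List.enumerate]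
      rw [hen, List.zip_cons_cons, List.foldl_cons, List.foldl_cons]
      have hget : PySem.List.pyGetD (pre ++ e :: suf') ((pre.length : Nat) : Int) ((0:Int),(0:Int)) = e := by
        rw [PySem.List.pyGetD_natCast]
        rw [List.getD_eq_getElem _ _ (by simp)]
        simp [List.getElem_append_right (le_refl pre.length)]
      have harr : ((pre.length : Int) + 1) = ((pre ++ [e]).length : Int) := by simp
      have happ : pre ++ e :: suf' = (pre ++ [e]) ++ suf' := by simp
      rw [hget, harr, happ]
      cases hc : c == group <;> simp only [hc, if_pos, if_neg, Bool.false_eq_true, if_false, if_true] <;>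
        exact ih (pre ++ [e]) suf' _ (by simpa using h)


lemma pvZipFold_mem (group : Int) (hg : 0 ≤ group) :
    ∀ (cs : List Int) (edges : List (Int × Int)) (vs : PySem.Set Int) (x : Int),
    (∀ c ∈ cs, 0 ≤ c) →
    (x ∈ (cs.zip edges).foldl (fun vs p =>
        if p.1 == group then PySem.Set.add (PySem.Set.add vs p.2.1) p.2.2 else vs) vs ↔
      x ∈ vs ∨ x ∈ pvCollect group.toNat edges cs) := by
  intro cs
  induction cs with
  | nil => intro edges vs x h; cases edges <;> simp [pvCollect]
  | cons c cs ih =>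
    intro edges vs x h
    cases edges with
    | nil => simp [pvCollect]
    | cons e es =>
      have hc : 0 ≤ c := h c (by simp)
      rw [List.zip_cons_cons, List.foldl_cons, pvCollect]
      by_cases hce : c = group
      · have hbeq : (c == group) = true := by simp [hce]
        have hnat : c.toNat = group.toNat := by rw [hce]
        rw [ih es _ x (fun c' hc' => h c' (by simp [hc']))]
        simp [hbeq, hnat, PySem.Set.mem_add]
        tauto
      · have hbeq : (c == group) = false := by simp [hce]
        have hnat : ¬ (c.toNat = group.toNat) := by omega
        rw [ih es _ x (fun c' hc' => h c' (by simp [hc']))]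
        simp [hbeq, hnat]


lemma pvZipFold_nodup (group : Int) :
    ∀ (l : List (Int × (Int × Int))) (vs : PySem.Set Int), vs.Nodup →
    (l.foldl (fun vs p =>
        if p.1 == group then PySem.Set.add (PySem.Set.add vs p.2.1) p.2.2 else vs) vs).Nodup := by
  intro l
  induction l with
  | nil => intro vs h; simpa using h
  | cons p l ih =>
    intro vs h
    rw [List.foldl_cons]
    by_cases hp : p.1 == group
    · simp only [hp, if_pos]
      exact ih _ (PySem.Set.nodup_add _ _ (PySem.Set.nodup_add _ _ h))
    · simp only [hp]
      simp only [Bool.false_eq_true, if_false] at *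
      exact ih _ h


lemma pvRangeAll_iff (es : List (Int × Int)) (verts : List Int) (hnd : verts.Nodup) :
    ((List.range verts.length).all (fun i => (List.range verts.length).all (fun j =>
        if i < j then
          PySem.Set.contains es
            (min (verts.getD i 0) (verts.getD j 0), max (verts.getD i 0) (verts.getD j 0))
        else true)) = true) ↔
      ∀ a ∈ verts, ∀ b ∈ verts, a ≠ b → PySem.Set.contains es (min a b, max a b) = true := by
  simp only [List.all_eq_true, List.mem_range]
  constructor
  · intro h a ha b hb hne
    obtain ⟨i, hi, rfl⟩ := List.mem_iff_getElem.mp ha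
    obtain ⟨j, hj, rfl⟩ := List.mem_iff_getElem.mp hb
    have hij : i ≠ j := by rintro rfl; exact hne rfl
    rcases Nat.lt_or_ge i j with hlt | hge
    · have := h i hi j hj
      simpa [hlt, List.getD_eq_getElem _ _ hi, List.getD_eq_getElem _ _ hj, List.getElem?_eq_getElem hi, List.getElem?_eq_getElem hj] using this
    · have hjl : j < i := by omega
      have := h j hj i hi
      simp only [hjl, if_pos, List.getD_eq_getElem _ _ hi, List.getD_eq_getElem _ _ hj, List.getElem?_eq_getElem hi, List.getElem?_eq_getElem hj, Option.getD_some] at this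
      rw [min_comm, max_comm] at this
      exact this
  · intro h i hi j hj
    by_cases hlt : i < j
    · simp only [hlt, if_pos, List.getD_eq_getElem _ _ hi, List.getD_eq_getElem _ _ hj, List.getElem?_eq_getElem hi, List.getElem?_eq_getElem hj, Option.getD_some]
      apply h _ (List.getElem_mem hi) _ (List.getElem_mem hj)
      intro he
      exact absurd ((List.Nodup.getElem_inj_iff hnd).mp he) (by omega)
    · simp [hlt]


lemma pvBoolEq {a b : Bool} (h : a = true ↔ b = true) : a = b := by
  cases a <;> cases b <;> simp_all

lemma pvCollect_nil : ∀ (t : Nat) (es : List (Int × Int)) (cs : List Int),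
    (∀ c ∈ cs, c.toNat ≠ t) → pvCollect t es cs = [] := by
  intro t es
  induction es with
  | nil => intro cs h; cases cs <;> rfl
  | cons e es ih =>
    intro cs h
    cases cs with
    | nil => rfl
    | cons c cs =>
      rw [pvCollect, ih cs (fun c' hc' => h c' (by simp [hc']))]
      simp [h c (by simp)]

-- one iteration of A's group loop equals the semantic clique test of the collected vertex list
lemma pvGroupCheck_iff (ES : List (Int × Int)) (edges : List (Int × Int)) (cs : List Int)
    (hlen : cs.length = edges.length) (hnonneg : ∀ c ∈ cs, 0 ≤ c) (group : Int) (hg : 0 ≤ group) :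
    (let vertices := (PySem.List.enumerate cs 0).foldl
        (fun vs p => if p.2 == group then
            PySem.Set.add (PySem.Set.add vs (PySem.List.pyGetD edges p.1 ((0:Int),(0:Int))).1)
              (PySem.List.pyGetD edges p.1 ((0:Int),(0:Int))).2
          else vs) PySem.Set.empty
     let verts := PySem.List.sorted vertices (fun x => x) false
     ((List.range verts.length).all (fun i => (List.range verts.length).all (fun j =>
        if i < j then
          PySem.Set.contains ES
            (min (verts.getD i 0) (verts.getD j 0), max (verts.getD i 0) (verts.getD j 0))
        else true))))
    = pvClique ES (pvCollect group.toNat edges cs) := by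
  have hzip := pvEnumFold group cs [] edges PySem.Set.empty (by simpa using hlen)
  simp only [List.length_nil, Nat.cast_zero, List.nil_append] at hzip
  simp only [hzip]
  set V := (cs.zip edges).foldl
      (fun vs p => if p.1 == group then PySem.Set.add (PySem.Set.add vs p.2.1) p.2.2 else vs)
      PySem.Set.empty with hV
  have hVnd : V.Nodup := pvZipFold_nodup group _ _ (by simp [PySem.Set.empty])
  have hVmem : ∀ x, x ∈ V ↔ x ∈ pvCollect group.toNat edges cs := by
    intro x
    rw [hV, pvZipFold_mem group hg cs edges _ x hnonneg]
    simp [PySem.Set.empty]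
  set verts := PySem.List.sorted V (fun x => x) false with hverts
  have hvnd : verts.Nodup := ((PySem.List.sorted_perm V (fun x => x) false).symm.nodup hVnd)
  have hvmem : ∀ x, x ∈ verts ↔ x ∈ pvCollect group.toNat edges cs := by
    intro x
    rw [hverts, PySem.List.mem_sorted]
    exact hVmem x
  apply pvBoolEq
  rw [pvRangeAll_iff ES verts hvnd, pvClique_iff_pairs]
  constructor
  · intro h a ha b hb
    exact h a ((hvmem a).mpr ha) b ((hvmem b).mpr hb)
  · intro h a ha b hb
    exact h a ((hvmem a).mp ha) b ((hvmem b).mp hb)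

-- A's validity check, on the tuples A actually enumerates, is the semantic predicate
lemma pvValid_eq (n : Int) (edges : List (Int × Int)) (m : Int) (cs : List Int)
    (hne : edges ≠ []) (hm : 1 ≤ m) (hlen : cs.length = edges.length)
    (hcs : ∀ c ∈ cs, 0 ≤ c ∧ c < m) :
    is_valid_edge_clique_cover n edges m cs =
      pvAllCliques (pvAdjL edges) (pvAssign (List.replicate m.toNat []) edges cs) := by
  have hL0 : edges.length ≠ 0 := by simpa [List.length_eq_zero_iff] using hne
  have hcs0 : cs ≠ [] := by
    intro h
    apply hL0
    rw [← hlen, h]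
    rfl
  obtain ⟨mg, hmg⟩ : ∃ mg, PySem.List.max? cs (fun x => x) = some mg := by
    cases h : PySem.List.max? cs (fun x => x) with
    | none => exact absurd ((PySem.List.max?_eq_none_iff _ _).mp h) hcs0
    | some mg => exact ⟨mg, rfl⟩
  have hmgmem : mg ∈ cs := PySem.List.max?_mem hmg
  have hmgmax : ∀ y ∈ cs, y ≤ mg := fun y hy => PySem.List.max?_isMax hmg y hy
  have hmg0 : 0 ≤ mg := (hcs mg hmgmem).1
  have hmgm : mg < m := (hcs mg hmgmem).2
  have hset : edges.foldl (fun s p => PySem.Set.add s (min p.1 p.2, max p.1 p.2)) PySem.Set.empty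
      = pvAdjL edges := by
    rw [pvAdjL, PySem.Set.ofList_eq_foldl, List.foldl_map]
    rfl
  simp only [is_valid_edge_clique_cover, hmg]
  rw [if_neg (by omega : ¬ cs.length ≠ edges.length), if_neg hL0]
  rw [if_neg (by omega : ¬ m ≤ mg)]
  rw [if_neg (by
    simp only [List.any_eq_true, decide_eq_true_eq]
    push_neg
    intro c hc
    exact (hcs c hc).1)]
  simp only [hset]
  apply pvBoolEq
  have hnonneg : ∀ c ∈ cs, 0 ≤ c := fun c hc => (hcs c hc).1
  constructor
  · intro h
    rw [List.all_eq_true] at h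
    simp only [pvAllCliques, List.all_eq_true]
    intro gl hgl
    have hlenassign : (pvAssign (List.replicate m.toNat []) edges cs).length = m.toNat := by
      rw [pvAssign_length, List.length_replicate]
    obtain ⟨t, ht, rfl⟩ := List.mem_iff_getElem.mp hgl
    have htm : t < m.toNat := by rwa [hlenassign] at ht
    have hgetD : (pvAssign (List.replicate m.toNat []) edges cs)[t] =
        pvCollect t edges cs := by
      rw [← List.getD_eq_getElem _ [] ht,
        pvAssign_getD edges cs _ t (by simpa using htm)]
      rw [List.getD_replicate _ htm]
      rfl
    rw [hgetD]
    by_cases hle : (t : Int) ≤ mg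
    · have hmem : (t : Int) ∈ PySem.List.pyRange 0 (mg + 1) 1 := by
        rw [PySem.List.mem_pyRange_one]
        omega
      have := h _ hmem
      have hiff := pvGroupCheck_iff (pvAdjL edges) edges cs hlen hnonneg (t : Int)
        (by omega)
      simp only [Int.toNat_natCast] at hiff
      exact hiff.symm.trans this
    · have : pvCollect t edges cs = [] := by
        apply pvCollect_nil
        intro c hc
        have h1 := hnonneg c hc
        have h2 := hmgmax c hc
        omega
      rw [this]
      rfl
  · intro h
    simp only [pvAllCliques, List.all_eq_true] at h
    rw [List.all_eq_true]
    intro group hgroup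
    rw [PySem.List.mem_pyRange_one] at hgroup
    have hiff := pvGroupCheck_iff (pvAdjL edges) edges cs hlen hnonneg group hgroup.1
    have htm : group.toNat < m.toNat := by omega
    have hlt : group.toNat < (pvAssign (List.replicate m.toNat []) edges cs).length := by
      rw [pvAssign_length, List.length_replicate]
      exact htm
    have hgetD : (pvAssign (List.replicate m.toNat []) edges cs)[group.toNat] =
        pvCollect group.toNat edges cs := by
      rw [← List.getD_eq_getElem _ [] hlt,
        pvAssign_getD edges cs _ group.toNat (by simpa [pvAssign_length] using hlt)]
      rw [List.getD_replicate _ htm]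
      rfl
    have := h _ (hgetD ▸ List.getElem_mem hlt)
    exact hiff.trans this

lemma pvRange_digits (m : Int) (hm : 0 ≤ m) :
    PySem.List.pyRange 0 m 1 = (List.range m.toNat).map (fun g : Nat => (g : Int)) := by
  rw [PySem.List.pyRange_one]
  simp only [sub_zero]
  exact List.map_congr_left (fun k _ => by omega)


lemma pvLoop_eq (n : Int) (edges : List (Int × Int)) (hne : edges ≠ []) :
    ∀ (fuel : Nat) (k m : Int), 1 ≤ m → (k + 1 - m).toNat ≤ fuel →
    pvALoop n edges k m = pvBLoop (pvAdjL edges) edges k m := by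
  intro fuel
  induction fuel with
  | zero =>
    intro k m _ hf
    rw [pvALoop, pvBLoop, if_neg (by omega), if_neg (by omega)]
  | succ fuel ih =>
    intro k m hm1 hf
    by_cases hlt : m < k + 1
    swap
    · rw [pvALoop, pvBLoop, if_neg hlt, if_neg hlt]
    rw [pvALoop, pvBLoop, if_pos hlt, if_pos hlt, pvProdFind_eq]
    have hdfs := pvDfs_spec (pvAdjL edges) edges (List.replicate m.toNat [])
      (fun vs hvs => by rw [List.eq_of_mem_replicate hvs]; rfl)
      (fun e he => by
        rw [PySem.Set.contains_iff]
        simp only [pvAdjL, pvNorm, PySem.Set.mem_ofList]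
        exact List.mem_map.mpr ⟨e, he, rfl⟩)
    rw [List.length_replicate] at hdfs
    have hcong : (pvProdA (PySem.List.pyRange 0 m 1) edges.length).find?
          (fun ec => is_valid_edge_clique_cover n edges m ec)
        = (pvProdA (PySem.List.pyRange 0 m 1) edges.length).find?
          (fun cs => pvAllCliques (pvAdjL edges) (pvAssign (List.replicate m.toNat []) edges cs)) := by
      apply pvFind?_congr
      intro cs hmem
      obtain ⟨hlen, hall⟩ := pvProdA_mem _ _ _ hmem
      apply pvValid_eq n edges m cs hne hm1 hlen
      intro c hc
      have := PySem.List.mem_pyRange_one.mp (hall c hc)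
      exact ⟨this.1, this.2⟩
    rw [hcong, pvRange_digits m (by omega), ← hdfs]
    cases hr : pvDfs (pvAdjL edges) edges (List.replicate m.toNat []) with
    | some cfg => rfl
    | none => exact ih k (m + 1) (by omega) (by omega)



-- ===== VERDICT (by name: the statement is the Claim_ definition above) =====
theorem min_edge_clique_cover_spec : Claim_equal_min_edge_clique_cover := by
  intro n edges k _
  show min_edge_clique_cover n edges k = min_edge_clique_cover_alt n edges k
  rw [min_edge_clique_cover, min_edge_clique_cover_alt]
  by_cases h : edges.length = 0
  · rw [if_pos h, if_pos h]
  · rw [if_neg h, if_neg h]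
    exact pvLoop_eq n edges (by simpa [List.length_eq_zero_iff] using h) (k + 1 - 1).toNat k 1
      (by omega) (by omega)
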